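-- pv_equiv track=rewrite | github.com/sheyslong/codeforces | List 2/D - Substring Removal Game.py | countAlice
-- ===== SOURCE A (Python) =====
-- def countAlice(array):
--     count=0
--     isAlice = True
--     for i in range(len(array)):
--         max_ = max(array)
--         if isAlice:
--             count+=max_
--         isAlice=not(isAlice)
--         array.remove(max_)
--     return count
-- ===== SOURCE B (Python) =====
-- def countAlice(array):
--     total = 0
--     take = True
--     for x in reversed(sorted(array)):
--         if take:
--             total += x
--         take = not take
--     return total
-- ===== Notes on version B (the rewrite author's own statement) =====
-- stated objective: faster
-- what changed: Replaces the quadratic repeated max()+remove() selection loop with one ascending sort followed by a single alternating scan of the sorted list from the top.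
import Mathlib
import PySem

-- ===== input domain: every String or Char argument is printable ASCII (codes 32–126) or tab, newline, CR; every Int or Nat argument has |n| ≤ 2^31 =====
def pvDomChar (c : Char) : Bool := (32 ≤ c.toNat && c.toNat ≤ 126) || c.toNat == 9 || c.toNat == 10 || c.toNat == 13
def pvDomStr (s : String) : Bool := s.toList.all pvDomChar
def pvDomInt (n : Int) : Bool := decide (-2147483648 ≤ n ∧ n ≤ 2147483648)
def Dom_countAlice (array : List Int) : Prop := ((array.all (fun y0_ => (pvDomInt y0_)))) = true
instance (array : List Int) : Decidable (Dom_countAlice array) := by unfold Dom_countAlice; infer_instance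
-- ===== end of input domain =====

-- B sorts once and scans, replacing A's O(n^2) repeated max+remove with an O(n log n) pass;
-- equivalence is about the RETURN value only (Python A empties its argument list in place, B does not).

-- ===== PORT A =====
-- 'for i in range(len(array))' with the shrinking array: fuel = initial length;
-- the 'none' branches (empty max, missing remove) are unreachable since the list has 'fuel' elements.
def countAliceLoop : Nat → List Int → Int → Bool → Int
  | 0, _, count, _ => count
  | n + 1, arr, count, isAlice =>
    match PySem.List.max? arr (fun x => x) with
    | none => count
    | some max_ =>
      let count' := if isAlice then count + max_ else count
      match PySem.List.remove? arr max_ with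
      | none => count'
      | some arr' => countAliceLoop n arr' count' (!isAlice)

def countAlice (array : List Int) : Int :=
  countAliceLoop array.length array 0 true

-- ===== PORT B =====
def countAlice_alt (array : List Int) : Int :=
  ((PySem.List.sorted array (fun x => x) false).reverse.foldl
    (fun (p : Int × Bool) x => (if p.2 then p.1 + x else p.1, !p.2)) (0, true)).1

-- ===== PRECONDITION & SPEC =====
def Spec_countAlice (array : List Int) (out : Int) : Prop := out = countAlice_alt array
instance (array : List Int) (out : Int) : Decidable (Spec_countAlice array out) := by unfold Spec_countAlice; infer_instance

-- ===== CLAIM (what is proved, stated in full; the proofs are below) =====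
def Claim_equal_countAlice : Prop := ∀ (array : List Int), Dom_countAlice array → Spec_countAlice array (countAlice array)

-- ===== LEMMAS AND PROOFS =====

-- Alice's alternating take over a list (true = Alice's turn).
def pvPick : Bool → List Int → Int
  | _, [] => 0
  | b, x :: t => (if b then x else 0) + pvPick (!b) t

theorem pvPick_foldl (l : List Int) : ∀ (c : Int) (b : Bool),
    (l.foldl (fun (p : Int × Bool) x => (if p.2 then p.1 + x else p.1, !p.2)) (c, b)).1
      = c + pvPick b l := by
  induction l with
  | nil => intro c b; simp [pvPick]
  | cons x t ih =>
    intro c b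
    simp only [List.foldl, pvPick]
    rw [ih]
    cases b <;> simp <;> try ring

-- Removing the max and sorting equals sorting then dropping the last element.
theorem pvSorted_erase_max (arr : List Int) (m : Int) (hm : m ∈ arr)
    (hmax : ∀ y ∈ arr, y ≤ m) :
    PySem.List.sorted arr (fun x => x) false
      = PySem.List.sorted (arr.erase m) (fun x => x) false ++ [m] := by
  apply PySem.List.sorted_id_eq_of_perm_of_pairwise
  · have h1 : (PySem.List.sorted (arr.erase m) (fun x => x) false ++ [m]).Perm
        ((arr.erase m) ++ [m]) :=
      (PySem.List.sorted_perm (arr.erase m) (fun x => x) false).append_right _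
    have h2 : ((arr.erase m) ++ [m]).Perm arr :=
      ((arr.erase m).perm_append_singleton m).trans (List.perm_cons_erase hm).symm
    exact h1.trans h2
  · rw [List.pairwise_append]
    refine ⟨?_, List.pairwise_singleton _ _, ?_⟩
    · exact PySem.List.sorted_pairwise (arr.erase m) (fun x => x)
    · intro a ha y hy
      have ha' : a ∈ arr.erase m :=
        (PySem.List.mem_sorted (arr.erase m) (fun x => x) false a).1 ha
      have haa : a ∈ arr := List.mem_of_mem_erase ha'
      simp at hy; subst hy
      exact hmax a haa

theorem pvLoop_pick : ∀ (n : Nat) (arr : List Int) (c : Int) (b : Bool),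
    arr.length = n →
    countAliceLoop n arr c b
      = c + pvPick b (PySem.List.sorted arr (fun x => x) false).reverse := by
  intro n
  induction n with
  | zero =>
    intro arr c b h
    have : arr = [] := List.length_eq_zero_iff.1 h
    subst this
    simp [countAliceLoop, PySem.List.sorted, pvPick]
  | succ n ih =>
    intro arr c b h
    have hne : arr ≠ [] := by intro h0; subst h0; simp at h
    obtain ⟨m, hm⟩ : ∃ m, PySem.List.max? arr (fun x => x) = some m := by
      cases hmx : PySem.List.max? arr (fun x => x) with
      | none => exact absurd ((PySem.List.max?_eq_none_iff arr (fun x => x)).1 hmx) hne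
      | some m => exact ⟨m, rfl⟩
    have hmem : m ∈ arr := PySem.List.max?_mem hm
    have hmax : ∀ y ∈ arr, y ≤ m := PySem.List.max?_isMax hm
    have hrem : PySem.List.remove? arr m = some (arr.erase m) :=
      PySem.List.remove?_eq_some_erase arr m hmem
    have hlen : (arr.erase m).length = n := by
      have := List.length_erase_of_mem hmem
      omega
    simp only [countAliceLoop, hm, hrem]
    rw [ih (arr.erase m) _ (!b) hlen,
        pvSorted_erase_max arr m hmem hmax, List.reverse_append]
    simp only [List.reverse_singleton, List.singleton_append, pvPick]
    cases b <;> simp <;> try ring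

-- ===== VERDICT (by name: the statement is the Claim_ definition above) =====
theorem countAlice_spec : Claim_equal_countAlice := by
  intro array _
  unfold Spec_countAlice countAlice countAlice_alt
  rw [pvLoop_pick array.length array 0 true rfl, pvPick_foldl]
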